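-- pv_equiv track=rewrite | github.com/Phong940253/conch-race | discord.py | reorder_emojis_by_race
-- ===== SOURCE A (Python) =====
-- def reorder_emojis_by_race(row_data, sheet_conch_order, race_conch_order):
--     """
--     row_data: one row from sheet
--     sheet_conch_order: LIST_CONCH (sheet column order)
--     race_conch_order: OCR order (current race)
--     """
--
--     # strip timestamp + winner
--     sheet_emojis = row_data[1:-1]
--
--     sheet_map = {
--         conch: emoji
--         for conch, emoji in zip(sheet_conch_order, sheet_emojis)
--         if emoji and emoji.strip()
--     }
--
--     return [sheet_map.get(conch, "") for conch in race_conch_order]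
-- ===== SOURCE B (Python) =====
-- def reorder_emojis_by_race(row_data, sheet_conch_order, race_conch_order):
--     # Scatter strategy: pre-index the OUTPUT positions for each conch, then make
--     # ONE pass over the (conch, emoji) pairs writing each valid emoji into every
--     # matching output slot (later pairs overwrite earlier ones, like dict insert).
--     emojis = row_data[1:-1]
--     result = [""] * len(race_conch_order)
--     positions = {}
--     for i, conch in enumerate(race_conch_order):
--         positions.setdefault(conch, []).append(i)
--     for conch, emoji in zip(sheet_conch_order, emojis):
--         if emoji and emoji.strip():
--             for i in positions.get(conch, []):
--                 result[i] = emoji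
--     return result
-- ===== Notes on version B (the rewrite author's own statement) =====
-- stated objective: alternative
-- what changed: Inverts the data flow from gather to scatter: instead of building a conch->emoji dict and looking it up per race entry, B pre-indexes the output positions of each race conch and makes one pass over the (conch, emoji) pairs writing each valid emoji into all matching output slots (later pairs overwrite).
import Mathlib
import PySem

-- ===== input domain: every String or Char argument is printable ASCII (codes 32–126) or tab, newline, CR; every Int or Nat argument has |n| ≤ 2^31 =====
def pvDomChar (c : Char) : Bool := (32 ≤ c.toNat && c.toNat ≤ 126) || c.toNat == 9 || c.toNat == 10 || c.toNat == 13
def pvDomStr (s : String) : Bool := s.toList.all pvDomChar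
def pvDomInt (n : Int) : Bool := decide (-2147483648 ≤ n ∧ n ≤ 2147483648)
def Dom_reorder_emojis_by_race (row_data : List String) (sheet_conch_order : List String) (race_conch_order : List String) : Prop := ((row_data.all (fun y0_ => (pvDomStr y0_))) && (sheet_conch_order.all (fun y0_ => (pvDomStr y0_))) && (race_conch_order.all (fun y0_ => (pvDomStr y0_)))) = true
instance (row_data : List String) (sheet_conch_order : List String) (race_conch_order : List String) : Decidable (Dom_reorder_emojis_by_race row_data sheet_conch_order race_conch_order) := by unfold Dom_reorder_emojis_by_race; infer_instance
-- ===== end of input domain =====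

-- B inverts A's gather (dict build + per-conch lookup) into a scatter: it indexes output positions per conch and writes each valid emoji into all matching slots in one pass; alternative decomposition, same results.


-- ===== PORT A =====
-- the comprehension's filter: `emoji and emoji.strip()` is truthy
def pvValid (e : String) : Bool := !(e == "") && !(PySem.Str.strip e == "")

def reorder_emojis_by_race (row_data : List String) (sheet_conch_order : List String) (race_conch_order : List String) : List String :=
  let sheet_emojis := PySem.List.slice row_data (some 1) (some (-1))
  let sheet_map := (sheet_conch_order.zip sheet_emojis).foldl
    (fun d p => if pvValid p.2 then d.insert p.1 p.2 else d) PySem.Dict.empty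
  race_conch_order.map (fun conch => sheet_map.getD conch "")

-- ===== PORT B =====
def reorder_emojis_by_race_alt (row_data : List String) (sheet_conch_order : List String) (race_conch_order : List String) : List String :=
  let emojis := PySem.List.slice row_data (some 1) (some (-1))
  let result0 := List.replicate race_conch_order.length ""
  -- positions.setdefault(conch, []).append(i): append i to the key's list (new keys start at [])
  let positions := (PySem.List.enumerate race_conch_order).foldl
    (fun d p => d.insert p.2 ((d.getD p.2 []) ++ [p.1])) PySem.Dict.empty
  -- result[i] = emoji: indices from enumerate are ≥ 0 and < len(result), so `.set i.toNat` is exact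
  (sheet_conch_order.zip emojis).foldl
    (fun res p => if pvValid p.2 then (positions.getD p.1 []).foldl (fun r i => r.set i.toNat p.2) res else res)
    result0

-- ===== PRECONDITION & SPEC =====
def Spec_reorder_emojis_by_race (row_data : List String) (sheet_conch_order : List String) (race_conch_order : List String) (out : List String) : Prop := out = reorder_emojis_by_race_alt row_data sheet_conch_order race_conch_order
instance (row_data : List String) (sheet_conch_order : List String) (race_conch_order : List String) (out : List String) : Decidable (Spec_reorder_emojis_by_race row_data sheet_conch_order race_conch_order out) := by unfold Spec_reorder_emojis_by_race; infer_instance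

-- ===== CLAIM =====
def Claim_equal_reorder_emojis_by_race : Prop := ∀ (row_data : List String) (sheet_conch_order : List String) (race_conch_order : List String), Dom_reorder_emojis_by_race row_data sheet_conch_order race_conch_order → Spec_reorder_emojis_by_race row_data sheet_conch_order race_conch_order (reorder_emojis_by_race row_data sheet_conch_order race_conch_order)

-- ===== LEMMAS AND PROOFS =====

-- A's lookup in the dict built by the conditional-insert fold equals the last-valid-match scan.
lemma getD_foldl_insertIf_eq_scan (pairs : List (String × String)) (d : PySem.Dict String String) (conch : String) :
    (pairs.foldl (fun d p => if pvValid p.2 then d.insert p.1 p.2 else d) d).getD conch ""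
      = pairs.foldl (fun found p => if p.1 == conch && pvValid p.2 then p.2 else found) (d.getD conch "") := by
  induction pairs generalizing d with
  | nil => rfl
  | cons p rest ih =>
    simp only [List.foldl_cons]
    by_cases hv : pvValid p.2
    · simp only [hv, if_true, Bool.and_true, ih]
      by_cases hk : p.1 = conch
      · simp [hk]
      · have : (p.1 == conch) = false := by simp [hk]
        simp [this, PySem.Dict.getD_insert, Ne.symm hk]
    · simp [hv, ih]

-- membership in the positions index built by the setdefault/append fold
lemma mem_positions_fold (L : List (Int × String)) (d : PySem.Dict String (List Int)) (c : String) (j : Int) :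
    j ∈ (L.foldl (fun d p => d.insert p.2 ((d.getD p.2 []) ++ [p.1])) d).getD c []
      ↔ j ∈ d.getD c [] ∨ (j, c) ∈ L := by
  induction L generalizing d with
  | nil => simp
  | cons p rest ih =>
    simp only [List.foldl_cons, ih, PySem.Dict.getD_insert]
    by_cases hc : c = p.2
    · subst hc; simp [Prod.ext_iff, or_assoc, eq_comm]
    · simp only [if_neg hc, List.mem_cons, Prod.ext_iff]
      tauto

-- writing at a list of indices preserves length
lemma length_foldl_set (e : String) (idxs : List Int) :
    ∀ res : List String, (idxs.foldl (fun r i => r.set i.toNat e) res).length = res.length := by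
  induction idxs with
  | nil => intro res; rfl
  | cons i rest ih => intro res; simp only [List.foldl_cons, ih, List.length_set]

-- writing e at a list of (toNat-cast) indices, observed at position n
lemma getElem?_foldl_set (idxs : List Int) (e : String) (n : Nat) :
    ∀ res : List String,
      (idxs.foldl (fun r i => r.set i.toNat e) res)[n]?
        = if ∃ i ∈ idxs, i.toNat = n then res[n]?.map (fun _ => e) else res[n]? := by
  induction idxs with
  | nil => simp
  | cons i rest ih =>
    intro res
    simp only [List.foldl_cons, ih]
    by_cases hi : i.toNat = n
    · subst hi
      by_cases hn : i.toNat < res.length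
      · simp [hn]
      · have h1 : (res.set i.toNat e)[i.toNat]? = none := by
          simp; omega
        have h2 : res[i.toNat]? = none := by simp; omega
        simp [h1, h2]
    · have hset : (res.set i.toNat e)[n]? = res[n]? := by
        rw [List.getElem?_set]; simp [hi]
      by_cases hex : ∃ k ∈ rest, k.toNat = n
      · have : ∃ k ∈ i :: rest, k.toNat = n := by
          obtain ⟨k, hk, hkn⟩ := hex; exact ⟨k, List.mem_cons_of_mem _ hk, hkn⟩
        simp [hset, hex]
      · have : ¬ ∃ k ∈ i :: rest, k.toNat = n := by
          rintro ⟨k, hk, hkn⟩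
          rcases List.mem_cons.mp hk with rfl | hk'
          · exact hi hkn
          · exact hex ⟨k, hk', hkn⟩
        simp [hset, hex, hi]

-- scatter fold observed at a fixed valid output position n equals the scan
lemma scatter_getElem? (ro : List String) (n : Nat) (hn : n < ro.length)
    (positions : PySem.Dict String (List Int))
    (hpos : ∀ c j, j ∈ positions.getD c [] ↔ ∃ (k : Nat) (h : k < ro.length), (j, c) = ((k : Int), ro[k])) :
    ∀ (pairs : List (String × String)) (res : List String), res.length = ro.length →
      (pairs.foldl
        (fun res p => if pvValid p.2 then (positions.getD p.1 []).foldl (fun r i => r.set i.toNat p.2) res else res)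
        res)[n]?
        = (res[n]?).map (fun v => pairs.foldl (fun found p => if p.1 == ro[n] && pvValid p.2 then p.2 else found) v) := by
  intro pairs
  induction pairs with
  | nil => intro res _; cases h : res[n]? <;> simp [h]
  | cons p rest ih =>
    intro res hlen
    simp only [List.foldl_cons]
    by_cases hv : pvValid p.2
    · have hlen' : ((positions.getD p.1 []).foldl (fun r i => r.set i.toNat p.2) res).length = ro.length := by
        rw [length_foldl_set, hlen]
      simp only [hv, if_true, Bool.and_true]
      rw [ih _ hlen', getElem?_foldl_set]
      by_cases hm : ∃ i ∈ positions.getD p.1 [], i.toNat = n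
      · -- some index for p.1 is n, so p.1 = ro[n]
        obtain ⟨i, hi, hin⟩ := hm
        obtain ⟨k, hk, hkc⟩ := (hpos p.1 i).mp hi
        have hik : i = (k : Int) := congrArg Prod.fst hkc
        have hkn : k = n := by rw [hik] at hin; simpa using hin
        have hcn : (p.1 == ro[n]) = true := by
          subst hkn; simpa using (congrArg Prod.snd hkc)
        have hex : ∃ i ∈ positions.getD p.1 [], i.toNat = n := ⟨i, hi, hin⟩
        rw [if_pos hex]
        cases res[n]? <;> simp [hcn]
      · have hcn : (p.1 == ro[n]) = false := by
          apply beq_eq_false_iff_ne.mpr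
          intro hEq
          exact hm ⟨(n : Int), (hpos p.1 (n : Int)).mpr ⟨n, hn, by simp [hEq]⟩, by simp⟩
        simp [hm, hcn]
    · rw [if_neg hv, ih _ hlen]
      simp [hv]

-- ===== VERDICT =====
-- length preservation of the scatter fold
lemma length_scatter (positions : PySem.Dict String (List Int)) (pairs : List (String × String)) :
    ∀ res : List String,
      (pairs.foldl
        (fun res p => if pvValid p.2 then (positions.getD p.1 []).foldl (fun r i => r.set i.toNat p.2) res else res)
        res).length = res.length := by
  induction pairs with
  | nil => intro res; rfl
  | cons p rest ih =>
    intro res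
    simp only [List.foldl_cons, ih]
    by_cases hv : pvValid p.2
    · simp [hv, length_foldl_set]
    · simp [hv]

-- ===== VERDICT =====
theorem reorder_emojis_by_race_spec : Claim_equal_reorder_emojis_by_race := by
  intro rd so ro _
  unfold Spec_reorder_emojis_by_race reorder_emojis_by_race reorder_emojis_by_race_alt
  simp only []
  have hpos : ∀ c j,
      j ∈ ((PySem.List.enumerate ro).foldl
        (fun d p => d.insert p.2 ((d.getD p.2 []) ++ [p.1])) PySem.Dict.empty).getD c []
        ↔ ∃ (k : Nat) (h : k < ro.length), (j, c) = ((k : Int), ro[k]) := by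
    intro c j
    rw [mem_positions_fold]
    simp [PySem.List.mem_enumerate_iff, Prod.ext_iff]
  apply List.ext_getElem?
  intro n
  by_cases hn : n < ro.length
  · rw [scatter_getElem? ro n hn _ hpos _ _ (by simp)]
    simp [getD_foldl_insertIf_eq_scan, hn]
  · have h1 : (ro.map fun conch =>
        ((so.zip (PySem.List.slice rd (some 1) (some (-1)))).foldl
          (fun d p => if pvValid p.2 then d.insert p.1 p.2 else d) PySem.Dict.empty).getD conch "")[n]? = none := by
      simp; omega
    have h2 := length_scatter
      ((PySem.List.enumerate ro).foldl (fun d p => d.insert p.2 ((d.getD p.2 []) ++ [p.1])) PySem.Dict.empty)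
      (so.zip (PySem.List.slice rd (some 1) (some (-1)))) (List.replicate ro.length "")
    rw [h1, List.getElem?_eq_none_iff.mpr (by rw [h2]; simpa using Nat.le_of_not_lt hn)]
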